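-- pv_equiv track=rewrite | github.com/tnechepurencko/Accompaniment_using_evolutional_algorithm | main.py | find_sharps_flats
-- ===== SOURCE A (Python) =====
-- def find_black_keys(notes: list):  # 2. Find black keys
--     """
--     :param notes: notes that the melody contains
--     :return:
--     """
--     black_keys = []
--     for note in notes:
--         if note not in WHITE_KEYS.values():
--             black_keys.append(note)
--     return black_keys
--
-- def complement_black_keys(notes: list):  # 3. Complement black keys
--     """
--     Some black notes may be not used in the melody, so it is important to complement them to determine the
--     tonic correctly: SHARPS_ORDER and FLATS_ORDER lists are used for this
--     :param notes: notes that the melody contains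
--     :return: complement black keys
--     """
--     black_keys = find_black_keys(notes)
--     if len(black_keys) != 0:
--         last_tonic_identifier_found = False
--         if black_keys[0] - 1 in notes:
--             for i in range(6, -1, -1):
--                 if last_tonic_identifier_found:
--                     if FLATS_ORDER[i] not in black_keys:
--                         black_keys.append(FLATS_ORDER[i])
--                 elif FLATS_ORDER[i] in black_keys:
--                     last_tonic_identifier_found = True
--         else:
--             for i in range(6, -1, -1):
--                 if last_tonic_identifier_found:
--                     if SHARPS_ORDER[i] not in black_keys:
--                         black_keys.append(SHARPS_ORDER[i])
--                 elif SHARPS_ORDER[i] in black_keys: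
--                     last_tonic_identifier_found = True
--     return black_keys
--
-- def find_sharps_flats(notes: list):  # 4. Find number of sharps or flats
--     """
--     :param notes: notes that the melody contains
--     :return: how many sharps or flats the melody contains (example: '4#')
--     """
--     black_keys = complement_black_keys(notes)
--     if len(black_keys) == 0:
--         return '0'
--     are_flats = False
--     for key in black_keys:  # Determine if black keys are flats
--         if key - 1 in notes:
--             are_flats = True
--             break
--     if are_flats:
--         return str(len(black_keys)) + 'b'
--     else:
--         return str(len(black_keys)) + '#'
--
-- WHITE_KEYS = {'C': 60, 'D': 62, 'E': 64, 'F': 65, 'G': 67, 'A': 69, 'B': 71}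
--
-- SHARPS_ORDER = [66, 61, 68, 63, 70, 65, 60]
--
-- FLATS_ORDER = [70, 63, 68, 61, 66, 71, 64]
-- ===== SOURCE B (Python) =====
-- WHITE_VALUES = {60, 62, 64, 65, 67, 69, 71}
-- SHARPS_ORDER = [66, 61, 68, 63, 70, 65, 60]
-- FLATS_ORDER = [70, 63, 68, 61, 66, 71, 64]
--
-- def _before_last(order, present):
--     """Elements of `order` strictly before its last element occurring in `present`,
--     by structural recursion: keep the head iff some later element is present."""
--     if not order or not any(x in present for x in order[1:]):
--         return []
--     return [order[0]] + _before_last(order[1:], present)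
--
-- def find_sharps_flats(notes: list):
--     blacks = [n for n in notes if n not in WHITE_VALUES]
--     if not blacks:
--         return '0'
--     present = set(blacks)
--     if blacks[0] - 1 in notes:
--         # flats: the first black key itself witnesses the flat test, so the label
--         # is 'b' without any scan; only the count of missing flats is needed
--         missing = sum(1 for x in _before_last(FLATS_ORDER, present) if x not in present)
--         return str(len(blacks) + missing) + 'b'
--     extra = [x for x in _before_last(SHARPS_ORDER, present) if x not in present]
--     flats = any(k - 1 in notes for k in blacks) or any(k - 1 in notes for k in extra)
--     return str(len(blacks) + len(extra)) + ('b' if flats else '#')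
-- ===== Notes on version B (the rewrite author's own statement) =====
-- stated objective: alternative
-- what changed: B replaces A's index-driven backward flag-scan that mutates the black-key list by a structural recursion on the order list (keep the head iff some later order element is among the black keys), only COUNTS the missing accidentals instead of appending them, and returns the 'b' label in the flats branch without any scan (the first black key already witnesses the flat test), scanning only in the sharps branch.
import Mathlib
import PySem

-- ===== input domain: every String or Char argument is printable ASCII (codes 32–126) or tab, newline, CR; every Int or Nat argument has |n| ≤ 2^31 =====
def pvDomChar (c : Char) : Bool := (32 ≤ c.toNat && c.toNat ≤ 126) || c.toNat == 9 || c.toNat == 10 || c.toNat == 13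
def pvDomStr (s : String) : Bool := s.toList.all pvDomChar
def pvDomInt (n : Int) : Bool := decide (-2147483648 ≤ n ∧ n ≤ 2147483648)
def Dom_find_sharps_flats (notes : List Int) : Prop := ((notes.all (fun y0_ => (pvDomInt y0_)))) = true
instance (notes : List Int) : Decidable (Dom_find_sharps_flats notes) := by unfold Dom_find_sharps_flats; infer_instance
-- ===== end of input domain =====

-- B replaces A's backward flag-scan by a structural recursion ("keep the head iff a later
-- order element is present among the black keys"), counts the missing accidentals instead of
-- appending them, and returns 'b' in the flats branch without any scan (objective: alternative).

-- ===== PORT A =====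
def pvWHITE : List Int := [60, 62, 64, 65, 67, 69, 71]   -- WHITE_KEYS.values()
def pvSHARPS : List Int := [66, 61, 68, 63, 70, 65, 60]
def pvFLATS : List Int := [70, 63, 68, 61, 66, 71, 64]

def find_black_keys (notes : List Int) : List Int :=
  notes.foldl (fun black_keys note =>
    if note ∉ pvWHITE then black_keys ++ [note] else black_keys) []

-- one iteration of A's `for i in range(6, -1, -1)` loop
-- (state: black_keys, last_tonic_identifier_found)
def pvComplStep (order : List Int) (st : List Int × Bool) (i : Int) : List Int × Bool :=
  if st.2 then
    if PySem.List.pyGetD order i 0 ∉ st.1 then (st.1 ++ [PySem.List.pyGetD order i 0], st.2) else st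
  else if PySem.List.pyGetD order i 0 ∈ st.1 then (st.1, true) else st

def complement_black_keys (notes : List Int) : List Int :=
  let black_keys := find_black_keys notes
  match black_keys with
  | [] => black_keys
  | b0 :: _ =>
    if b0 - 1 ∈ notes then
      ((PySem.List.pyRange 6 (-1) (-1)).foldl (pvComplStep pvFLATS) (black_keys, false)).1
    else
      ((PySem.List.pyRange 6 (-1) (-1)).foldl (pvComplStep pvSHARPS) (black_keys, false)).1

def find_sharps_flats (notes : List Int) : String :=
  let black_keys := complement_black_keys notes
  if black_keys.length = 0 then "0"
  else
    let are_flats := black_keys.any (fun key => decide ((key - 1) ∈ notes))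
    if are_flats then PySem.Int.toStr (black_keys.length : Int) ++ "b"
    else PySem.Int.toStr (black_keys.length : Int) ++ "#"

-- ===== PORT B =====
-- Source B's helper _before_last(order, present): structural recursion on the order list
def pvBeforeLast (order : List Int) (present : PySem.Set Int) : List Int :=
  match order with
  | [] => []
  | x :: rest =>
    if rest.any (fun y => present.contains y) then x :: pvBeforeLast rest present
    else []

def find_sharps_flats_alt (notes : List Int) : String :=
  let blacks := notes.filter (fun n => !pvWHITE.contains n)
  match blacks with
  | [] => "0"
  | b0 :: rest =>
    let blacks := b0 :: rest
    let present := PySem.Set.ofList blacks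
    if b0 - 1 ∈ notes then
      let missing := ((pvBeforeLast pvFLATS present).filter (fun x => !present.contains x)).length
      PySem.Int.toStr ((blacks.length : Int) + (missing : Int)) ++ "b"
    else
      let extra := (pvBeforeLast pvSHARPS present).filter (fun x => !present.contains x)
      let flats := blacks.any (fun k => decide ((k - 1) ∈ notes))
                || extra.any (fun k => decide ((k - 1) ∈ notes))
      PySem.Int.toStr ((blacks.length : Int) + (extra.length : Int)) ++ (if flats then "b" else "#")

-- ===== PRECONDITION & SPEC =====
def Spec_find_sharps_flats (notes : List Int) (out : String) : Prop := out = find_sharps_flats_alt notes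
instance (notes : List Int) (out : String) : Decidable (Spec_find_sharps_flats notes out) := by unfold Spec_find_sharps_flats; infer_instance

-- ===== CLAIM (what is proved, stated in full; the proofs are below) =====
def Claim_equal_find_sharps_flats : Prop := ∀ (notes : List Int), Dom_find_sharps_flats notes → Spec_find_sharps_flats notes (find_sharps_flats notes)

-- ===== LEMMAS AND PROOFS =====

lemma pv_blacks_eq (notes : List Int) :
    find_black_keys notes = notes.filter (fun n => !pvWHITE.contains n) := by
  unfold find_black_keys
  rw [PySem.List.foldl_append_ite_eq_filter]
  simp [decide_not]

-- ===== A's backward flag-scan, proved against B's recursion by a generic loop lemma =====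
-- one loop step of A, with the looked-up order value already substituted
def pvStepV (st : List Int × Bool) (v : Int) : List Int × Bool :=
  if st.2 then (if v ∉ st.1 then (st.1 ++ [v], st.2) else st)
  else if v ∈ st.1 then (st.1, true) else st

lemma pv_fold_flats (s : List Int × Bool) :
    (PySem.List.pyRange 6 (-1) (-1)).foldl (pvComplStep pvFLATS) s
      = pvFLATS.reverse.foldl pvStepV s := by
  rw [show PySem.List.pyRange 6 (-1) (-1) = [6,5,4,3,2,1,0] from by decide]
  rfl

lemma pv_fold_sharps (s : List Int × Bool) :
    (PySem.List.pyRange 6 (-1) (-1)).foldl (pvComplStep pvSHARPS) s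
      = pvSHARPS.reverse.foldl pvStepV s := by
  rw [show PySem.List.pyRange 6 (-1) (-1) = [6,5,4,3,2,1,0] from by decide]
  rfl

lemma pv_contains_ofList (bk : List Int) (x : Int) :
    (PySem.Set.ofList bk).contains x = decide (x ∈ bk) := by
  by_cases h : x ∈ bk <;> simp [PySem.Set.mem_ofList, h]

lemma pvBeforeLast_cons (S : PySem.Set Int) (x : Int) (rest : List Int) :
    pvBeforeLast (x :: rest) S
      = if rest.any (fun y => S.contains y) then x :: pvBeforeLast rest S else [] := rfl

lemma pv_beforeLast_subset (bk : List Int) (vs : List Int) (x : Int)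
    (h : x ∈ pvBeforeLast vs (PySem.Set.ofList bk)) : x ∈ vs := by
  induction vs with
  | nil => simp [pvBeforeLast] at h
  | cons v rest ih =>
    rw [pvBeforeLast_cons] at h
    by_cases hb : rest.any (fun y => (PySem.Set.ofList bk).contains y) = true
    · rw [if_pos hb] at h
      rcases List.mem_cons.mp h with h1 | h2
      · exact h1 ▸ List.mem_cons_self
      · exact List.mem_cons_of_mem _ (ih h2)
    · rw [if_neg hb] at h; cases h

lemma pv_beforeLast_nil (bk : List Int) (vs : List Int)
    (h : vs.any (fun v => decide (v ∈ bk)) = false) :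
    pvBeforeLast vs (PySem.Set.ofList bk) = [] := by
  cases vs with
  | nil => rfl
  | cons v rest =>
    rw [pvBeforeLast_cons]
    have hr : rest.any (fun y => (PySem.Set.ofList bk).contains y) = false := by
      have h2 := List.any_eq_false.mp h
      refine List.any_eq_false.mpr (fun y hy => ?_)
      rw [pv_contains_ofList]
      exact h2 y (List.mem_cons_of_mem _ hy)
    rw [hr]
    simp

-- the generic loop lemma: A's flag-scan over the reversed order list computes
-- bk ++ (B's before-last prefix, filtered to the missing ones).reverse, with the flag = "any present"
lemma pv_loop (bk : List Int) (vs : List Int) (hnd : vs.Nodup) :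
    vs.reverse.foldl pvStepV (bk, false)
      = (bk ++ ((pvBeforeLast vs (PySem.Set.ofList bk)).filter
            (fun x => !(PySem.Set.ofList bk).contains x)).reverse,
         vs.any (fun v => decide (v ∈ bk))) := by
  rw [List.foldl_reverse]
  induction vs with
  | nil => simp [pvBeforeLast]
  | cons x rest ih =>
    have hnd' : rest.Nodup := hnd.of_cons
    have hxr : x ∉ rest := (List.nodup_cons.mp hnd).1
    have hcong : rest.any (fun y => (PySem.Set.ofList bk).contains y)
        = rest.any (fun v => decide (v ∈ bk)) := by
      simp only [pv_contains_ofList]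
    rw [List.foldr_cons, ih hnd', pvBeforeLast_cons, hcong]
    by_cases hrest : rest.any (fun v => decide (v ∈ bk)) = true
    · -- flag already true: A appends x iff x is missing; B keeps x in the prefix
      rw [if_pos hrest]
      have hxF : x ∉ (pvBeforeLast rest (PySem.Set.ofList bk)).filter
          (fun x => !(PySem.Set.ofList bk).contains x) := by
        intro hmem
        exact hxr (pv_beforeLast_subset bk rest x (List.mem_of_mem_filter hmem))
      by_cases hx : x ∈ bk
      · have hfx : (!(PySem.Set.ofList bk).contains x) = false := by
          rw [pv_contains_ofList]; simp [hx]
        simp [pvStepV, hx, hrest]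
      · have hmem : x ∉ bk ++ ((pvBeforeLast rest (PySem.Set.ofList bk)).filter
            (fun x => !(PySem.Set.ofList bk).contains x)).reverse := by
          intro h
          rcases List.mem_append.mp h with h1 | h2
          · exact hx h1
          · exact hxF (List.mem_reverse.mp h2)
        have hfx : (!(PySem.Set.ofList bk).contains x) = true := by
          rw [pv_contains_ofList]; simp [hx]
        simp only [pvStepV, List.filter_cons, hfx]
        rw [if_pos hmem]
        simp [hrest, List.append_assoc]
    · -- flag still false: nothing appended yet; B's prefix is empty
      have hrf : rest.any (fun v => decide (v ∈ bk)) = false :=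
        Bool.eq_false_iff.mpr hrest
      rw [if_neg hrest, pv_beforeLast_nil bk rest hrf]
      by_cases hx : x ∈ bk
      · simp [pvStepV, hx, hrf]
      · simp [pvStepV, hx, hrf]

lemma pv_core_flats (bk : List Int) :
    ((PySem.List.pyRange 6 (-1) (-1)).foldl (pvComplStep pvFLATS) (bk, false)).1
      = bk ++ ((pvBeforeLast pvFLATS (PySem.Set.ofList bk)).filter
          (fun x => !(PySem.Set.ofList bk).contains x)).reverse := by
  rw [pv_fold_flats, pv_loop bk pvFLATS (by decide)]

lemma pv_core_sharps (bk : List Int) :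
    ((PySem.List.pyRange 6 (-1) (-1)).foldl (pvComplStep pvSHARPS) (bk, false)).1
      = bk ++ ((pvBeforeLast pvSHARPS (PySem.Set.ofList bk)).filter
          (fun x => !(PySem.Set.ofList bk).contains x)).reverse := by
  rw [pv_fold_sharps, pv_loop bk pvSHARPS (by decide)]

-- A's final assembly in the flats branch: the first black key already witnesses the flat test
lemma pv_assemble_flats (notes : List Int) (b0 : Int) (rest L : List Int) (hf : b0 - 1 ∈ notes) :
    (if ((b0 :: rest) ++ L.reverse).length = 0 then "0"
     else if ((b0 :: rest) ++ L.reverse).any (fun key => decide ((key - 1) ∈ notes)) then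
       PySem.Int.toStr ((((b0 :: rest) ++ L.reverse).length : Nat) : Int) ++ "b"
     else PySem.Int.toStr ((((b0 :: rest) ++ L.reverse).length : Nat) : Int) ++ "#")
    = PySem.Int.toStr (((b0 :: rest).length : Int) + (L.length : Int)) ++ "b" := by
  have hany : ((b0 :: rest) ++ L.reverse).any (fun key => decide ((key - 1) ∈ notes)) = true := by
    simp [hf]
  have hlen : ((((b0 :: rest) ++ L.reverse).length : Nat) : Int)
      = ((b0 :: rest).length : Int) + (L.length : Int) := by
    simp only [List.length_append, List.length_cons, List.length_reverse]; push_cast; omega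
  rw [if_neg (by simp), if_pos hany, hlen]

-- A's final assembly in the sharps branch
lemma pv_assemble_sharps (notes : List Int) (b0 : Int) (rest L : List Int) :
    (if ((b0 :: rest) ++ L.reverse).length = 0 then "0"
     else if ((b0 :: rest) ++ L.reverse).any (fun key => decide ((key - 1) ∈ notes)) then
       PySem.Int.toStr ((((b0 :: rest) ++ L.reverse).length : Nat) : Int) ++ "b"
     else PySem.Int.toStr ((((b0 :: rest) ++ L.reverse).length : Nat) : Int) ++ "#")
    = PySem.Int.toStr (((b0 :: rest).length : Int) + (L.length : Int)) ++
        (if ((b0 :: rest).any (fun k => decide ((k - 1) ∈ notes))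
             || L.any (fun k => decide ((k - 1) ∈ notes))) then "b" else "#") := by
  have hany : ((b0 :: rest) ++ L.reverse).any (fun key => decide ((key - 1) ∈ notes))
      = ((b0 :: rest).any (fun k => decide ((k - 1) ∈ notes))
          || L.any (fun k => decide ((k - 1) ∈ notes))) := by
    simp [List.any_append, Bool.or_assoc]
  have hlen : ((((b0 :: rest) ++ L.reverse).length : Nat) : Int)
      = ((b0 :: rest).length : Int) + (L.length : Int) := by
    simp only [List.length_append, List.length_cons, List.length_reverse]; push_cast; omega
  rw [if_neg (by simp), hany, hlen]
  exact (apply_ite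
    (fun s => PySem.Int.toStr (((b0 :: rest).length : Int) + (L.length : Int)) ++ s)
    (((b0 :: rest).any (fun k => decide ((k - 1) ∈ notes))
        || L.any (fun k => decide ((k - 1) ∈ notes))) = true) "b" "#").symm

-- ===== VERDICT (by name: the statement is the Claim_ definition above) =====
theorem find_sharps_flats_spec : Claim_equal_find_sharps_flats := by
  intro notes _
  unfold Spec_find_sharps_flats
  unfold find_sharps_flats complement_black_keys find_sharps_flats_alt
  rw [pv_blacks_eq notes]
  cases hfil : notes.filter (fun n => !pvWHITE.contains n) with
  | nil => rfl
  | cons b0 rest =>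
    by_cases hf : b0 - 1 ∈ notes
    · simp only [hf, if_pos]
      rw [pv_core_flats (b0 :: rest)]
      exact pv_assemble_flats notes b0 rest
        ((pvBeforeLast pvFLATS (PySem.Set.ofList (b0 :: rest))).filter
          (fun x => !(PySem.Set.ofList (b0 :: rest)).contains x)) hf
    · simp only [hf, if_false]
      rw [pv_core_sharps (b0 :: rest)]
      exact pv_assemble_sharps notes b0 rest
        ((pvBeforeLast pvSHARPS (PySem.Set.ofList (b0 :: rest))).filter
          (fun x => !(PySem.Set.ofList (b0 :: rest)).contains x))
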